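-- pv_equiv track=rewrite | github.com/Cyberamirka/LinProgOtrabotka | LinprogMethods/Simplex_method.py | dual_sol_row
-- ===== SOURCE A (Python) =====
-- def dual_sol_row(lst):
--     ind = -1
--     i = 0
--     while i < len(lst) and ind == -1:
--         if lst[i] < 0:
--             ind = i
--         i += 1
--     while i < len(lst):
--         if lst[ind] > lst[i]:
--             ind = i
--         i += 1
--     return ind
-- ===== SOURCE B (Python) =====
-- def dual_sol_row(lst):
--     if not lst:
--         return -1
--     m = min(lst)
--     return lst.index(m) if m < 0 else -1
-- ===== Notes on version B (the rewrite author's own statement) =====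
-- stated objective: simpler
-- what changed: A's single fused scan (find first negative, then continue updating a running argmin) is replaced by a two-pass formulation: compute the global minimum with min(), then return its first index via list.index() if it is negative, else -1.
import Mathlib
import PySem

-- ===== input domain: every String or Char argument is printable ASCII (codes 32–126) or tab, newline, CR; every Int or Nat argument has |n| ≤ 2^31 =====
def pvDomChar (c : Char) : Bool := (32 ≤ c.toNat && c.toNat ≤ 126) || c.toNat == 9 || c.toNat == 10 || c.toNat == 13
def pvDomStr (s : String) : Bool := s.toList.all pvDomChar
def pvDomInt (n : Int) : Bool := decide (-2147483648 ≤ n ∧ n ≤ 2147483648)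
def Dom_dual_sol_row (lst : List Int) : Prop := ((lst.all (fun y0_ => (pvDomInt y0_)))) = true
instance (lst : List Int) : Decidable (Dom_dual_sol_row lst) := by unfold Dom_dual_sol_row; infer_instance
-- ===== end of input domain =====

-- B replaces A's fused scan (first-negative then running argmin) with min() followed by index(); objective: simpler.

-- ===== PORT A =====
-- first while loop: 'while i < len(lst) and ind == -1: if lst[i] < 0: ind = i; i += 1'
def pvALoop1 (lst : List Int) (i : Nat) (ind : Int) : Nat × Int :=
  if h : i < lst.length ∧ ind = -1 then
    if lst[i]'h.1 < 0 then pvALoop1 lst (i + 1) (i : Int)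
    else pvALoop1 lst (i + 1) ind
  else (i, ind)
termination_by lst.length - i

-- second while loop: 'while i < len(lst): if lst[ind] > lst[i]: ind = i; i += 1'
-- lst[ind] is PySem.List.pyGet?; '.getD 0' is unreachable: whenever this loop body runs,
-- ind is a valid non-negative index set by the first loop (exact on all runs A performs).
def pvALoop2 (lst : List Int) (i : Nat) (ind : Int) : Int :=
  if h : i < lst.length then
    if (PySem.List.pyGet? lst ind).getD 0 > lst[i]'h then pvALoop2 lst (i + 1) (i : Int)
    else pvALoop2 lst (i + 1) ind
  else ind
termination_by lst.length - i

def dual_sol_row (lst : List Int) : Int :=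
  let r := pvALoop1 lst 0 (-1)
  pvALoop2 lst r.1 r.2

-- ===== PORT B =====
-- Source B: if not lst: return -1; m = min(lst); return lst.index(m) if m < 0 else -1
-- both '.getD 0' are unreachable (lst nonempty, m ∈ lst)
def dual_sol_row_alt (lst : List Int) : Int :=
  if lst.isEmpty then -1
  else
    let m := (PySem.List.min? lst (fun x => x)).getD 0
    if m < 0 then ((PySem.List.index? lst m).getD 0 : Nat) else -1

-- ===== PRECONDITION & SPEC =====
def Spec_dual_sol_row (lst : List Int) (out : Int) : Prop := out = dual_sol_row_alt lst
instance (lst : List Int) (out : Int) : Decidable (Spec_dual_sol_row lst out) := by unfold Spec_dual_sol_row; infer_instance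

-- ===== CLAIM (what is proved, stated in full; the proofs are below) =====
def Claim_equal_dual_sol_row : Prop := ∀ (lst : List Int), Dom_dual_sol_row lst → Spec_dual_sol_row lst (dual_sol_row lst)

-- ===== LEMMAS AND PROOFS =====

-- proof-only model of A's second loop, carrying the current minimum value explicitly
def pvGo (xs : List Int) (i ind : Nat) (v : Int) : Nat :=
  match xs with
  | [] => ind
  | x :: t => if v > x then pvGo t (i + 1) i x else pvGo t (i + 1) ind v

lemma drop_cons_split {lst t : List Int} {x : Int} {i : Nat} (h : lst.drop i = x :: t) :
    ∃ hi : i < lst.length, lst[i] = x ∧ lst.drop (i + 1) = t := by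
  have hi : i < lst.length := by
    by_contra hle
    rw [List.drop_eq_nil_of_le (by omega)] at h; simp at h
  have h2 := List.drop_eq_getElem_cons hi
  rw [h2] at h
  exact ⟨hi, (List.cons.injEq _ _ _ _ ▸ h).1, (List.cons.injEq _ _ _ _ ▸ h).2⟩

lemma foldl_min_le_init : ∀ (t : List Int) (v : Int), t.foldl min v ≤ v := by
  intro t; induction t with
  | nil => intro v; simp
  | cons x t ih =>
    intro v; simp only [List.foldl_cons]
    exact le_trans (ih (min v x)) (min_le_left _ _)

lemma foldl_min_le_mem : ∀ (t : List Int) (v y : Int), y ∈ t → t.foldl min v ≤ y := by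
  intro t; induction t with
  | nil => intro v y hy; simp at hy
  | cons x t ih =>
    intro v y hy
    rcases List.mem_cons.mp hy with rfl | hy
    · exact le_trans (foldl_min_le_init t _) (min_le_right _ _)
    · exact ih _ _ hy

lemma foldl_min_eq_self : ∀ (t : List Int) (v : Int), (∀ y ∈ t, v ≤ y) → t.foldl min v = v := by
  intro t; induction t with
  | nil => intro v _; simp
  | cons x t ih =>
    intro v h; simp only [List.foldl_cons]
    rw [min_eq_left (h x (by simp))]
    exact ih v (fun y hy => h y (by simp [hy]))

lemma foldl_min_mem : ∀ (t : List Int) (v : Int), t.foldl min v = v ∨ t.foldl min v ∈ t := by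
  intro t; induction t with
  | nil => intro v; simp
  | cons x t ih =>
    intro v; simp only [List.foldl_cons]
    rcases ih (min v x) with h | h
    · rw [h]
      rcases min_cases v x with ⟨h1, _⟩ | ⟨h1, _⟩
      · left; exact h1
      · right; simp [h1]
    · right; simp [h]

-- characterization of the running-argmin loop: it ends at the current index if the carried
-- value is already minimal, else at the first position of the overall minimum in xs
lemma pvGo_idx : ∀ (xs : List Int) (i ind : Nat) (v : Int),
    pvGo xs i ind v = if ∀ x ∈ xs, v ≤ x then ind else i + List.idxOf (xs.foldl min v) xs := by
  intro xs; induction xs with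
  | nil => intro i ind v; simp [pvGo]
  | cons x t ih =>
    intro i ind v
    simp only [pvGo, List.foldl_cons]
    by_cases hvx : v > x
    · rw [if_pos hvx, ih (i + 1) i x,
          if_neg (show ¬ ∀ z ∈ x :: t, v ≤ z by push_neg; exact ⟨x, by simp, hvx⟩),
          min_eq_right (le_of_lt hvx)]
      by_cases hall : ∀ y ∈ t, x ≤ y
      · rw [if_pos hall, foldl_min_eq_self t x hall, List.idxOf_cons_self]
        omega
      · rw [if_neg hall]
        push_neg at hall
        obtain ⟨y, hy, hyx⟩ := hall
        have hlt : t.foldl min x < x := lt_of_le_of_lt (foldl_min_le_mem t x y hy) hyx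
        rw [List.idxOf_cons_ne t (by intro hEq; omega)]
        omega
    · push_neg at hvx
      rw [if_neg (show ¬ v > x by omega), ih (i + 1) ind v, min_eq_left hvx]
      by_cases hall : ∀ y ∈ t, v ≤ y
      · rw [if_pos hall, if_pos (show ∀ z ∈ x :: t, v ≤ z by
          intro y hy
          rcases List.mem_cons.mp hy with rfl | hy
          · exact hvx
          · exact hall y hy)]
      · rw [if_neg hall,
            if_neg (show ¬ ∀ z ∈ x :: t, v ≤ z by
              push_neg at hall ⊢; obtain ⟨y, hy, h⟩ := hall; exact ⟨y, by simp [hy], h⟩)]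
        push_neg at hall
        obtain ⟨y, hy, hyv⟩ := hall
        have hlt : t.foldl min v < x := lt_of_le_of_lt (foldl_min_le_mem t v y hy) (lt_of_lt_of_le hyv hvx)
        rw [List.idxOf_cons_ne t (by intro hEq; omega)]
        omega

-- A's second loop equals the value-carrying model
lemma pvALoop2_eq_go : ∀ (suf lst : List Int) (i ind : Nat), lst.drop i = suf →
    ∀ hind : ind < lst.length, pvALoop2 lst i (ind : Int) = ((pvGo suf i ind (lst[ind]'hind) : Nat) : Int) := by
  intro suf; induction suf with
  | nil =>
    intro lst i ind hd hind
    have hle : lst.length ≤ i := List.drop_eq_nil_iff.mp hd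
    rw [pvALoop2, dif_neg (by omega)]; rfl
  | cons x t ih =>
    intro lst i ind hd hind
    obtain ⟨hi, hx, hdt⟩ := drop_cons_split hd
    rw [pvALoop2, dif_pos hi]
    have hget : (PySem.List.pyGet? lst (ind : Int)).getD 0 = lst[ind]'hind := by
      rw [PySem.List.pyGet?_natCast, List.getElem?_eq_getElem hind]; rfl
    rw [hget, hx]
    simp only [pvGo]
    by_cases hc : lst[ind]'hind > x
    · rw [if_pos hc, if_pos hc, ih lst (i + 1) i hdt hi, hx]
    · rw [if_neg hc, if_neg hc, ih lst (i + 1) ind hdt hind]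

lemma pvALoop2_exit (lst : List Int) (i : Nat) (ind : Int) (h : lst.length ≤ i) :
    pvALoop2 lst i ind = ind := by
  rw [pvALoop2, dif_neg (by omega)]

-- first loop, no negative in the remaining suffix: ind stays -1 and i passes the end
lemma pvALoop1_none : ∀ (suf lst : List Int) (i : Nat), lst.drop i = suf → (∀ x ∈ suf, 0 ≤ x) →
    (pvALoop1 lst i (-1)).2 = -1 ∧ lst.length ≤ (pvALoop1 lst i (-1)).1 := by
  intro suf; induction suf with
  | nil =>
    intro lst i hd _
    have hle : lst.length ≤ i := List.drop_eq_nil_iff.mp hd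
    rw [pvALoop1, dif_neg (by omega)]
    exact ⟨rfl, hle⟩
  | cons x t ih =>
    intro lst i hd hnn
    obtain ⟨hi, hx, hdt⟩ := drop_cons_split hd
    rw [pvALoop1, dif_pos ⟨hi, rfl⟩, hx, if_neg (by have := hnn x (by simp); omega)]
    exact ih lst (i + 1) hdt (fun y hy => hnn y (by simp [hy]))

-- first loop, first negative element at position i + pre.length
lemma pvALoop1_found : ∀ (pre lst : List Int) (i : Nat) (a : Int) (rest : List Int),
    lst.drop i = pre ++ a :: rest → (∀ x ∈ pre, 0 ≤ x) → a < 0 →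
    pvALoop1 lst i (-1) = (i + pre.length + 1, ((i + pre.length : Nat) : Int)) := by
  intro pre; induction pre with
  | nil =>
    intro lst i a rest hd _ ha
    obtain ⟨hi, hx, _⟩ := drop_cons_split hd
    rw [pvALoop1, dif_pos ⟨hi, rfl⟩, hx, if_pos ha]
    rw [pvALoop1, dif_neg (by intro h; omega)]
    simp
  | cons p pre' ih =>
    intro lst i a rest hd hnn ha
    obtain ⟨hi, hx, hdt⟩ := drop_cons_split hd
    rw [pvALoop1, dif_pos ⟨hi, rfl⟩, hx, if_neg (by have := hnn p (by simp); omega)]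
    rw [ih lst (i + 1) a rest (by simpa using hdt) (fun y hy => hnn y (by simp [hy])) ha]
    simp only [List.length_cons, Prod.mk.injEq]
    exact ⟨by omega, by push_cast; omega⟩

lemma first_neg : ∀ (lst : List Int), (∃ x ∈ lst, x < 0) →
    ∃ pre a rest, lst = pre ++ a :: rest ∧ a < 0 ∧ ∀ x ∈ pre, 0 ≤ x := by
  intro lst; induction lst with
  | nil => intro h; simp at h
  | cons x t ih =>
    intro h
    by_cases hx : x < 0
    · exact ⟨[], x, t, by simp, hx, by simp⟩
    · obtain ⟨y, hy, hylt⟩ := h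
      rcases List.mem_cons.mp hy with rfl | hy
      · omega
      · obtain ⟨pre, a, rest, heq, ha, hpre⟩ := ih ⟨y, hy, hylt⟩
        exact ⟨x :: pre, a, rest, by simp [heq], ha,
          fun z hz => by rcases List.mem_cons.mp hz with rfl | hz; omega; exact hpre z hz⟩

lemma index?_of_mem : ∀ (xs : List Int) (v : Int), v ∈ xs →
    PySem.List.index? xs v = some (List.idxOf v xs) := by
  intro xs; induction xs with
  | nil => intro v hv; simp at hv
  | cons x t ih =>
    intro v hv
    by_cases hx : x = v
    · subst hx; rw [PySem.List.index?_cons_self, List.idxOf_cons_self]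
    · rcases List.mem_cons.mp hv with rfl | hv
      · omega
      · rw [PySem.List.index?_cons_of_ne t hx, ih v hv, List.idxOf_cons_ne t hx]
        simp

lemma idxOf_append_of_not_mem : ∀ (pre t : List Int) (v : Int), v ∉ pre →
    List.idxOf v (pre ++ t) = pre.length + List.idxOf v t := by
  intro pre t v; induction pre with
  | nil => intro _; simp
  | cons p pre' ih =>
    intro hv
    rw [List.cons_append, List.idxOf_cons_ne _ (by intro h; exact hv (by simp [h.symm]))]
    rw [ih (fun h => hv (by simp [h]))]
    simp only [List.length_cons, Nat.succ_eq_add_one]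
    omega

-- ===== VERDICT (by name: the statement is the Claim_ definition above) =====
theorem dual_sol_row_spec : Claim_equal_dual_sol_row := by
  intro lst _
  unfold Spec_dual_sol_row dual_sol_row dual_sol_row_alt
  by_cases hneg : ∃ x ∈ lst, x < 0
  · obtain ⟨pre, a, rest, heq, ha, hpre⟩ := first_neg lst hneg
    subst heq
    -- A side
    rw [pvALoop1_found pre _ 0 a rest (by simp) hpre ha]
    simp only [Nat.zero_add]
    have hjlt : pre.length < (pre ++ a :: rest).length := by simp
    have hgetj : (pre ++ a :: rest)[pre.length]'hjlt  = a := by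
      rw [List.getElem_append_right (by omega)]; simp
    have hdrop : (pre ++ a :: rest).drop (pre.length + 1) = rest := by
      rw [show pre ++ a :: rest = (pre ++ [a]) ++ rest by simp,
          show pre.length + 1 = (pre ++ [a]).length by simp, List.drop_left]
    rw [pvALoop2_eq_go rest _ (pre.length + 1) pre.length hdrop hjlt, hgetj, pvGo_idx]
    -- B side facts: the minimum of the whole list is M = rest.foldl min a
    have hMle : (rest.foldl min a) ≤ a := foldl_min_le_init rest a
    have hMneg : (rest.foldl min a) < 0 := by omega
    have hMmem : (rest.foldl min a) ∈ a :: rest := by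
      rcases foldl_min_mem rest a with h | h
      · simp [h]
      · simp [h]
    have hMnotpre : (rest.foldl min a) ∉ pre := fun h => by have := hpre (rest.foldl min a) h; omega
    have hm : PySem.List.min? (pre ++ a :: rest) (fun x => x) = some (rest.foldl min a) := by
      rcases hminEq : PySem.List.min? (pre ++ a :: rest) (fun x => x) with _ | m
      · rw [PySem.List.min?_eq_none_iff] at hminEq; simp at hminEq
      · have hmem := PySem.List.min?_mem hminEq
        have hmin : ∀ y ∈ pre ++ a :: rest, m ≤ y := fun y hy => PySem.List.min?_isMin hminEq y hy
        have hma : m ≤ a := hmin a (by simp)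
        have hmemcons : m ∈ a :: rest := by
          rcases List.mem_append.mp hmem with h | h
          · have := hpre m h; omega
          · exact h
        have h1 : (rest.foldl min a) ≤ m := by
          rcases List.mem_cons.mp hmemcons with rfl | h
          · exact hMle
          · exact foldl_min_le_mem rest a m h
        have h2 : m ≤ (rest.foldl min a) := hmin (rest.foldl min a) (by
          rcases List.mem_cons.mp hMmem with hEq | h
          · rw [hEq]; simp
          · simp [h])
        rw [show m = (rest.foldl min a) by omega]
    by_cases hall : ∀ x ∈ rest, a ≤ x
    · rw [if_pos hall]
      have hMa : (rest.foldl min a) = a := foldl_min_eq_self rest a hall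
      rw [if_neg (by simp), hm]
      simp only [Option.getD_some]
      rw [if_pos hMneg, index?_of_mem _ (rest.foldl min a) (by simp [List.mem_cons.mp hMmem]),
          idxOf_append_of_not_mem pre _ (rest.foldl min a) hMnotpre, hMa, List.idxOf_cons_self]
      simp
    · rw [if_neg hall]
      push_neg at hall
      obtain ⟨y, hy, hyv⟩ := hall
      have hlt : (rest.foldl min a) < a := lt_of_le_of_lt (foldl_min_le_mem rest a y hy) hyv
      rw [if_neg (by simp), hm]
      simp only [Option.getD_some]
      rw [if_pos hMneg, index?_of_mem _ (rest.foldl min a) (by simp [List.mem_cons.mp hMmem]),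
          idxOf_append_of_not_mem pre _ (rest.foldl min a) hMnotpre,
          List.idxOf_cons_ne rest (by intro hEq; omega)]
      simp only [Option.getD_some]
      push_cast
      omega
  · push_neg at hneg
    have h1 := pvALoop1_none lst lst 0 (by simp) (fun x hx => hneg x hx)
    rw [pvALoop2_exit lst _ _ h1.2, h1.1]
    by_cases hnil : lst = []
    · subst hnil; simp
    · rw [if_neg (by simp [hnil])]
      rcases hminEq : PySem.List.min? lst (fun x => x) with _ | m
      · rw [PySem.List.min?_eq_none_iff] at hminEq; exact absurd hminEq hnil
      · have hm0 := hneg m (PySem.List.min?_mem hminEq)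
        simp only [Option.getD_some]
        rw [if_neg (by omega)]
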